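-- pv_equiv track=rewrite | github.com/ruziniuuuuu/niukb | Code/PyAcmEnv/meituan/meituan3.py | count_similar_nodes
-- ===== SOURCE A (Python) =====
-- from collections import defaultdict
--
-- def count_similar_nodes(n, edges):
--     # Build a tree
--     children = defaultdict(list)
--     for u, v in edges:
--         children[u].append(v)
--
--     # count child nodes for every node
--     node_counts = defaultdict(int)
--     for node, child_list in children.items():
--         node_counts[len(child_list)] += 1
--
--     # count leaf nodes
--     for node in range(1, n + 1):
--         if node not in children:
--             node_counts[0] += 1
--
--     similar_node_counts = 0
--     for count in node_counts.values():
--         similar_node_counts += count * (count - 1) // 2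
--
--     return similar_node_counts
-- ===== SOURCE B (Python) =====
-- def count_similar_nodes(n, edges):
--     # Count each parent's out-degree directly, then count equal pairs incrementally.
--     deg = {}
--     for u, _v in edges:
--         deg[u] = deg.get(u, 0) + 1
--     degrees = list(deg.values()) + [0] * sum(1 for node in range(1, n + 1) if node not in deg)
--     total = 0
--     seen = {}
--     for d in degrees:
--         s = seen.get(d, 0)
--         total += s
--         seen[d] = s + 1
--     return total
-- ===== Notes on version B (the rewrite author's own statement) =====
-- stated objective: alternative
-- what changed: B replaces A's children-lists dict, degree-class dict and per-class closed form c*(c-1)//2 with a direct out-degree counter over the edge list and a single incremental pair-counting pass (total += number of previously seen equal degrees).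
import Mathlib
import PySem

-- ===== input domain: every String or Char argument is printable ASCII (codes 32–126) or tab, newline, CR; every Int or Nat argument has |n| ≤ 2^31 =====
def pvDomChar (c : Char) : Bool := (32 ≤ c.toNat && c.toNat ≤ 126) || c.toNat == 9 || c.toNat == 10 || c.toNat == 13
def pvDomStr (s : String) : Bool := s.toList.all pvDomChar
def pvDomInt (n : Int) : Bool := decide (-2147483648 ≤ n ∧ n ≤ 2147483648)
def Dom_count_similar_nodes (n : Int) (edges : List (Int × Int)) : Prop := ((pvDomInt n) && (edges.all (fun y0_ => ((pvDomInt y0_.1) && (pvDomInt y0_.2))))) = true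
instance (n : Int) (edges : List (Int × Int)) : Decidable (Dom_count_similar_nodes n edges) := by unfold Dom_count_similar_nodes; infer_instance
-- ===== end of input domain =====

-- B counts out-degrees directly from the edge list and counts equal-degree pairs in one
-- incremental pass, instead of A's children-lists dict, degree-class dict and closed form.

-- ===== PORT A =====
def count_similar_nodes (n : Int) (edges : List (Int × Int)) : Int :=
  -- children = defaultdict(list); for u, v in edges: children[u].append(v)
  let children := edges.foldl (fun d p => d.modify p.1 [] (fun l => l ++ [p.2])) PySem.Dict.empty
  -- node_counts = defaultdict(int); for node, child_list in children.items(): node_counts[len(child_list)] += 1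
  let node_counts := children.items.foldl
      (fun nc p => nc.modify ((p.2.length : Int)) 0 (· + 1)) PySem.Dict.empty
  -- for node in range(1, n + 1): if node not in children: node_counts[0] += 1
  let node_counts := (PySem.List.pyRange 1 (n + 1) 1).foldl
      (fun nc node => if children.contains node then nc else nc.modify 0 0 (· + 1)) node_counts
  -- similar_node_counts = 0; for count in node_counts.values(): … += count * (count - 1) // 2
  node_counts.values.foldl (fun acc c => acc + PySem.Int.floordiv (c * (c - 1)) 2) 0

-- ===== PORT B =====
def count_similar_nodes_alt (n : Int) (edges : List (Int × Int)) : Int :=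
  -- deg = {}; for u, _v in edges: deg[u] = deg.get(u, 0) + 1
  let deg := edges.foldl (fun d p => d.insert p.1 (d.getD p.1 0 + 1)) PySem.Dict.empty
  -- degrees = list(deg.values()) + [0] * sum(1 for node in range(1, n + 1) if node not in deg)
  -- (the sum of 1 over the matching nodes is the length of the filtered range, a Nat; [0]*k is replicate)
  let m := ((PySem.List.pyRange 1 (n + 1) 1).filter (fun node => !(deg.contains node))).length
  let degrees := deg.values ++ List.replicate m (0 : Int)
  -- total = 0; seen = {}; for d in degrees: s = seen.get(d, 0); total += s; seen[d] = s + 1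
  (degrees.foldl
      (fun (st : Int × PySem.Dict Int Int) d =>
        let s := st.2.getD d 0
        (st.1 + s, st.2.insert d (s + 1)))
      (0, PySem.Dict.empty)).1

-- ===== PRECONDITION & SPEC =====
def Spec_count_similar_nodes (n : Int) (edges : List (Int × Int)) (out : Int) : Prop := out = count_similar_nodes_alt n edges
instance (n : Int) (edges : List (Int × Int)) (out : Int) : Decidable (Spec_count_similar_nodes n edges out) := by unfold Spec_count_similar_nodes; infer_instance

-- ===== CLAIM (what is proved, stated in full; the proofs are below) =====
def Claim_equal_count_similar_nodes : Prop := ∀ (n : Int) (edges : List (Int × Int)), Dom_count_similar_nodes n edges → Spec_count_similar_nodes n edges (count_similar_nodes n edges)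

-- ===== LEMMAS AND PROOFS =====

-- C(c, 2) as A computes it
def pairC (c : Int) : Int := PySem.Int.floordiv (c * (c - 1)) 2
def SCl (l : List (Int × Int)) : Int := (l.map (fun p => pairC p.2)).sum
def SC (d : PySem.Dict Int Int) : Int := SCl d.items

-- the map relating A's children dict to B's degree dict
def pvF (p : Int × List Int) : Int × Int := (p.1, (p.2.length : Int))

lemma pairC_succ (s : Int) : pairC (s + 1) = pairC s + s := by
  obtain ⟨k, hk⟩ : Even ((s - 1) * s) := by
    simpa using Int.even_mul_succ_self (s - 1)
  have hk' : s * (s - 1) = 2 * k := by linarith [hk, mul_comm (s - 1) s]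
  have hb : (s + 1) * (s + 1 - 1) = 2 * (k + s) := by linear_combination hk'
  unfold pairC
  rw [hb, hk', PySem.Int.floordiv_eq_ediv_of_pos (by norm_num),
    PySem.Int.floordiv_eq_ediv_of_pos (by norm_num)]
  omega

lemma map_replace_eq_self (l : List (Int × Int)) (x v : Int)
    (h : x ∉ l.map Prod.fst) :
    l.map (fun p => if p.1 == x then (x, v) else p) = l := by
  induction l with
  | nil => rfl
  | cons a t ih =>
    simp only [List.map_cons, List.mem_cons, not_or] at h ⊢
    rw [if_neg (by simpa using (Ne.symm h.1)), ih h.2]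

lemma SCl_replace (l : List (Int × Int)) (x s : Int)
    (hnd : (l.map Prod.fst).Nodup) (hmem : (x, s) ∈ l) :
    SCl (l.map (fun p => if p.1 == x then (x, s + 1) else p)) = SCl l + s := by
  induction l with
  | nil => simp at hmem
  | cons a t ih =>
    simp only [List.map_cons, List.nodup_cons] at hnd
    rcases List.mem_cons.mp hmem with h | h
    · subst h
      simp only [List.map_cons, beq_self_eq_true, if_pos]
      have ht : t.map (fun p => if p.1 == x then (x, s + 1) else p) = t :=
        map_replace_eq_self t x (s + 1) hnd.1
      rw [ht]
      simp only [SCl, List.map_cons, List.sum_cons, pairC_succ]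
      ring
    · have hax : a.1 ≠ x := by
        intro he
        exact hnd.1 (he ▸ (List.mem_map.mpr ⟨(x, s), h, rfl⟩))
      simp only [List.map_cons, beq_iff_eq, if_neg hax, SCl, List.sum_cons, List.map_map]
      have := ih hnd.2 h
      simp only [SCl, List.map_map, beq_iff_eq] at this
      rw [this]; ring

lemma SC_cstep (d : PySem.Dict Int Int) (x : Int) (h : d.keys.Nodup) :
    SC (d.insert x (d.getD x 0 + 1)) = SC d + d.getD x 0 := by
  cases hc : d.contains x with
  | false =>
    rw [PySem.Dict.getD_of_not_contains d _ hc]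
    rw [SC, PySem.Dict.items_insert_of_not_contains d _ hc]
    simp [SCl, SC, pairC]
  | true =>
    have hsome : d.get? x = some (d.getD x 0) := by
      rw [PySem.Dict.contains_eq_isSome_get?] at hc
      cases hg : d.get? x with
      | none => rw [hg] at hc; simp at hc
      | some w => rw [PySem.Dict.getD_of_get?_eq_some d 0 hg]
    have hmem : (x, d.getD x 0) ∈ d.items := PySem.Dict.mem_items_of_get?_eq_some _ hsome
    rw [SC, PySem.Dict.items_insert_of_contains d _ hc]
    exact SCl_replace d.items x (d.getD x 0) (by simpa [PySem.Dict.keys] using h) hmem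

lemma pair_inv (L : List Int) (t : Int) (seen : PySem.Dict Int Int) (h : seen.keys.Nodup) :
    (L.foldl (fun (st : Int × PySem.Dict Int Int) d =>
        let s := st.2.getD d 0
        (st.1 + s, st.2.insert d (s + 1))) (t, seen)).1
      = t + SC (L.foldl (fun d x => d.insert x (d.getD x 0 + 1)) seen) - SC seen := by
  induction L generalizing t seen with
  | nil => simp
  | cons x L ih =>
    simp only [List.foldl_cons]
    rw [ih (t + seen.getD x 0) (seen.insert x (seen.getD x 0 + 1))
      (PySem.Dict.nodup_keys_insert seen x _ h)]
    rw [SC_cstep seen x h]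
    ring

-- A's children dict and B's degree dict stay related by pvF along the edge fold
lemma deg_children_rel (edges : List (Int × Int)) (d1 : PySem.Dict Int (List Int))
    (d2 : PySem.Dict Int Int) (hnd : d1.keys.Nodup) (hrel : d2.items = d1.items.map pvF) :
    (edges.foldl (fun d p => d.modify p.1 [] (fun l => l ++ [p.2])) d1).keys.Nodup ∧
    (edges.foldl (fun d p => d.insert p.1 (d.getD p.1 0 + 1)) d2).items
      = (edges.foldl (fun d p => d.modify p.1 [] (fun l => l ++ [p.2])) d1).items.map pvF := by
  induction edges generalizing d1 d2 with
  | nil => exact ⟨hnd, hrel⟩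
  | cons e es ih =>
    obtain ⟨u, v⟩ := e
    have hmod : d1.modify u [] (fun l => l ++ [v]) = d1.insert u (d1.getD u [] ++ [v]) := rfl
    have hkeys : d2.keys = d1.keys := by
      simp only [PySem.Dict.keys, hrel, List.map_map]
      rfl
    have hcont : d2.contains u = d1.contains u := by
      rw [PySem.Dict.contains_eq_decide_mem_keys, PySem.Dict.contains_eq_decide_mem_keys, hkeys]
    have hnd2 : d2.keys.Nodup := hkeys ▸ hnd
    simp only [List.foldl_cons, hmod]
    cases hc : d1.contains u with
    | false =>
      have hc2 : d2.contains u = false := hcont.trans hc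
      apply ih
      · exact PySem.Dict.nodup_keys_insert d1 u _ hnd
      · rw [PySem.Dict.items_insert_of_not_contains d2 _ hc2,
          PySem.Dict.items_insert_of_not_contains d1 _ hc,
          PySem.Dict.getD_of_not_contains d2 _ hc2,
          PySem.Dict.getD_of_not_contains d1 _ hc, hrel, List.map_append]
        rfl
    | true =>
      have hc2 : d2.contains u = true := hcont.trans hc
      have hval : d2.getD u 0 = ((d1.getD u [] : List Int).length : Int) := by
        have hsome : d1.get? u = some (d1.getD u []) := by
          rw [PySem.Dict.contains_eq_isSome_get?] at hc
          cases hg : d1.get? u with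
          | none => rw [hg] at hc; simp at hc
          | some w => rw [PySem.Dict.getD_of_get?_eq_some d1 [] hg]
        have hm1 : (u, d1.getD u []) ∈ d1.items := PySem.Dict.mem_items_of_get?_eq_some _ hsome
        have hm2 : (u, ((d1.getD u [] : List Int).length : Int)) ∈ d2.items := by
          rw [hrel]; exact List.mem_map.mpr ⟨_, hm1, rfl⟩
        exact PySem.Dict.getD_of_mem_items d2 hm2 hnd2 0
      apply ih
      · exact PySem.Dict.nodup_keys_insert d1 u _ hnd
      · rw [PySem.Dict.items_insert_of_contains d2 _ hc2,
          PySem.Dict.items_insert_of_contains d1 _ hc, hrel, List.map_map, List.map_map]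
        apply List.map_congr_left
        intro p hp
        by_cases hpu : p.1 = u
        · have hsome : d1.get? u = some p.2 := by
            rw [PySem.Dict.get?_eq_some_iff_mem_items d1 u p.2 hnd]
            rw [← hpu]; exact hp
          have hpv : d1.getD u [] = p.2 := PySem.Dict.getD_of_get?_eq_some d1 [] hsome
          simp only [Function.comp, pvF, hpu, beq_self_eq_true, if_pos, hval, hpv]
          simp
        · simp [Function.comp, pvF, hpu]

lemma SC_empty : SC (PySem.Dict.empty : PySem.Dict Int Int) = 0 := rfl

lemma foldl_const_replicate {α β : Type} (g : α → β → α) (b : β) :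
    ∀ (l : List β) (a0 : α), l.foldl (fun a _ => g a b) a0
      = (List.replicate l.length b).foldl g a0
  | [], a0 => rfl
  | _ :: t, a0 => by
    simp only [List.foldl_cons, List.length_cons, List.replicate_succ]
    exact foldl_const_replicate g b t _

theorem count_similar_nodes_spec : Claim_equal_count_similar_nodes := by
  intro n edges _
  unfold Spec_count_similar_nodes
  simp only [count_similar_nodes, count_similar_nodes_alt]
  obtain ⟨hnd, hrel⟩ :=
    deg_children_rel edges PySem.Dict.empty PySem.Dict.empty (by decide) rfl
  set children := edges.foldl (fun d p => d.modify p.1 [] (fun l => l ++ [p.2]))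
      PySem.Dict.empty with hch
  set deg : PySem.Dict Int Int := edges.foldl (fun d p => d.insert p.1 (d.getD p.1 0 + 1)) PySem.Dict.empty with hdg
  have hvals : deg.values = children.items.map (fun p => ((p.2.length : Nat) : Int)) := by
    simp only [PySem.Dict.values, hrel, List.map_map]
    exact List.map_congr_left (fun p _ => rfl)
  have hcont : ∀ x, deg.contains x = children.contains x := by
    intro x
    rw [PySem.Dict.contains_eq_decide_mem_keys, PySem.Dict.contains_eq_decide_mem_keys]
    simp only [PySem.Dict.keys, hrel, List.map_map]
    have : ∀ q : Int × List Int, ((pvF q).1) = q.1 := fun q => rfl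
    simp [this]
  -- the common multiset of out-degrees, as a list
  set fl := (PySem.List.pyRange 1 (n + 1) 1).filter (fun node => !(children.contains node))
    with hfl
  set L := children.items.map (fun p => ((p.2.length : Nat) : Int))
      ++ List.replicate fl.length (0 : Int) with hL
  -- B's side equals SC (counter L)
  have hflB : (PySem.List.pyRange 1 (n + 1) 1).filter (fun node => !(deg.contains node)) = fl := by
    rw [hfl]; exact List.filter_congr (fun x _ => by rw [hcont x])
  have hB : (L.foldl (fun (st : Int × PySem.Dict Int Int) d =>
        let s := st.2.getD d 0
        (st.1 + s, st.2.insert d (s + 1))) (0, PySem.Dict.empty)).1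
      = SC (PySem.Dict.counter L) := by
    rw [pair_inv L 0 PySem.Dict.empty (by decide),
      PySem.Dict.foldl_insert_getD_add_one_eq_counter, SC_empty]
    ring
  rw [hvals, hflB, ← hL, hB]
  -- A's side equals SC (counter L)
  have hstep1 : children.items.foldl
      (fun nc p => nc.modify ((p.2.length : Nat) : Int) 0 (· + 1)) PySem.Dict.empty
      = (children.items.map (fun p => ((p.2.length : Nat) : Int))).foldl
          (fun nc c => nc.modify c 0 (· + 1)) PySem.Dict.empty := by
    rw [List.foldl_map]
  have hifeq : (fun (nc : PySem.Dict Int Int) node =>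
        if children.contains node then nc else nc.modify 0 0 (· + 1))
      = (fun nc node => if (!(children.contains node)) = true then nc.modify 0 0 (· + 1) else nc) := by
    funext nc node; cases children.contains node <;> simp
  have hstep2 : ∀ nc0 : PySem.Dict Int Int,
      (PySem.List.pyRange 1 (n + 1) 1).foldl
        (fun nc node => if children.contains node then nc else nc.modify 0 0 (· + 1)) nc0
      = (List.replicate fl.length (0 : Int)).foldl (fun nc c => nc.modify c 0 (· + 1)) nc0 := by
    intro nc0
    rw [hifeq, ← List.foldl_filter, ← hfl,
      foldl_const_replicate (fun nc c => nc.modify c 0 (· + 1)) (0 : Int) fl nc0]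
  rw [hstep2]
  have hA : PySem.Dict.counter L
      = (List.replicate fl.length (0 : Int)).foldl (fun nc c => nc.modify c 0 (· + 1))
          (children.items.foldl (fun nc p => nc.modify ((p.2.length : Int)) 0 (· + 1))
            PySem.Dict.empty) := by
    rw [PySem.Dict.counter_eq_foldl, hL, List.foldl_append, List.foldl_map]
  have hSC : ∀ d : PySem.Dict Int Int,
      List.foldl (fun acc c => acc + PySem.Int.floordiv (c * (c - 1)) 2) 0 d.values = SC d := by
    intro d
    rw [PySem.List.foldl_add]
    simp only [SC, SCl, PySem.Dict.values, List.map_map, pairC, zero_add]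
    rfl
  rw [← hSC (PySem.Dict.counter L)]
  exact (congrArg (fun d : PySem.Dict Int Int =>
    List.foldl (fun acc c => acc + PySem.Int.floordiv (c * (c - 1)) 2) 0 d.values) hA).symm
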